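-- pv_equiv track=rewrite | github.com/sehrish-hub/General_Health_Query_Chatbot | chatbot.py | safety_filter
-- ===== SOURCE A (Python) =====
-- def safety_filter(user_input):
--       # List of dangerous keywords
--     dangerous_keywords = [
--         "suicide",
--         "kill myself",
--         "overdose",
--         "self harm",
--         "die",
--         "emergency"
--     ]
--       # Check if any dangerous word exists in user input
--     for word in dangerous_keywords:
--
--         if word in user_input.lower():
--
--             return False
--      # Safe question
--     return True
-- ===== SOURCE B (Python) =====
-- def safety_filter(user_input):
--     # One left-to-right scan over positions: at each position, check whether
--     # any dangerous keyword starts there.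
--     dangerous_keywords = [
--         "suicide",
--         "kill myself",
--         "overdose",
--         "self harm",
--         "die",
--         "emergency"
--     ]
--     s = user_input.lower()
--     for i in range(len(s) + 1):
--         for word in dangerous_keywords:
--             if s.startswith(word, i):
--                 return False
--     return True
-- ===== Notes on version B (the rewrite author's own statement) =====
-- stated objective: alternative
-- what changed: Replaces six sequential full-string substring searches with a single left-to-right scan over positions that tests at each position whether any keyword starts there (and lowers the input once instead of per keyword).
import Mathlib
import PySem

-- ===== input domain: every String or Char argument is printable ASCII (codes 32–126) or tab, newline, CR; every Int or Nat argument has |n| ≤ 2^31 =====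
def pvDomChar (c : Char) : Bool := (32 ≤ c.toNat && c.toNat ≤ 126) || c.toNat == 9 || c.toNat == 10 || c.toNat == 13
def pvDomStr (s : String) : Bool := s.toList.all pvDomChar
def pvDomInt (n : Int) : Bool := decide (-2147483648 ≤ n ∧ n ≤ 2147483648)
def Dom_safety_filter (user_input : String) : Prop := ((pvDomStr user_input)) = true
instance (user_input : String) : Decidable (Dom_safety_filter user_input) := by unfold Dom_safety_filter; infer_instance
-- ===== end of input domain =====

-- B replaces six sequential substring searches with one left-to-right scan over
-- positions testing each keyword with startswith (alternative decomposition, similar cost).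


-- ===== PORT A =====
def pvKeywordsA : List (List Char) :=
  ["suicide".toList, "kill myself".toList, "overdose".toList,
   "self harm".toList, "die".toList, "emergency".toList]

-- A's loop over the keyword list; 'word in user_input.lower()' is Chars.isIn on the lowered input
def safety_filter_loop (user_input : String) : List (List Char) → Bool
  | [] => true
  | w :: ws =>
      if PySem.Chars.isIn w (PySem.Chars.lower user_input.toList) then false
      else safety_filter_loop user_input ws

def safety_filter (user_input : String) : Bool :=
  safety_filter_loop user_input pvKeywordsA

-- ===== PORT B =====
def pvKeywordsB : List (List Char) :=
  ["suicide".toList, "kill myself".toList, "overdose".toList,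
   "self harm".toList, "die".toList, "emergency".toList]

-- B's scan: for each position (suffix of the lowered input, including the empty one,
-- matching range(len(s)+1)), does some keyword start there?
def safety_filter_scan (kws : List (List Char)) : List Char → Bool
  | [] => if kws.any (fun w => PySem.Chars.startswith [] w) then false else true
  | c :: t =>
      if kws.any (fun w => PySem.Chars.startswith (c :: t) w) then false
      else safety_filter_scan kws t

def safety_filter_alt (user_input : String) : Bool :=
  safety_filter_scan pvKeywordsB (PySem.Chars.lower user_input.toList)

-- ===== PRECONDITION & SPEC =====
def Spec_safety_filter (user_input : String) (out : Bool) : Prop := out = safety_filter_alt user_input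
instance (user_input : String) (out : Bool) : Decidable (Spec_safety_filter user_input out) := by unfold Spec_safety_filter; infer_instance

-- ===== CLAIM (what is proved, stated in full; the proofs are below) =====
def Claim_equal_safety_filter : Prop := ∀ (user_input : String), Dom_safety_filter user_input → Spec_safety_filter user_input (safety_filter user_input)

-- ===== LEMMAS AND PROOFS =====

-- B's scan returns false exactly when some keyword occurs as an infix of s
theorem scan_eq_false_iff (kws : List (List Char)) (s : List Char) :
    safety_filter_scan kws s = false ↔ ∃ w ∈ kws, w <:+: s := by
  induction s with
  | nil =>
      simp only [safety_filter_scan]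
      split_ifs with hany
      · simp only [List.any_eq_true, PySem.Chars.startswith_iff] at hany
        obtain ⟨w, hw, hp⟩ := hany
        exact iff_of_true rfl ⟨w, hw, hp.isInfix⟩
      · simp only [List.any_eq_true, PySem.Chars.startswith_iff] at hany
        push Not at hany
        constructor
        · intro h; cases h
        · rintro ⟨w, hw, hinf⟩
          exact absurd (List.infix_nil.mp hinf ▸ List.nil_prefix) (hany w hw)
  | cons c t ih =>
      simp only [safety_filter_scan]
      split_ifs with hany
      · simp only [List.any_eq_true, PySem.Chars.startswith_iff] at hany
        obtain ⟨w, hw, hp⟩ := hany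
        exact iff_of_true rfl ⟨w, hw, hp.isInfix⟩
      · rw [ih]
        simp only [List.any_eq_true, PySem.Chars.startswith_iff] at hany
        push Not at hany
        constructor
        · rintro ⟨w, hw, hinf⟩
          exact ⟨w, hw, hinf.trans (List.suffix_cons c t).isInfix⟩
        · rintro ⟨w, hw, hinf⟩
          rcases List.infix_cons_iff.mp hinf with hp | hi
          · exact absurd hp (hany w hw)
          · exact ⟨w, hw, hi⟩

-- A's loop returns false exactly when some keyword occurs as an infix of the lowered input
theorem loop_eq_false_iff (u : String) (kws : List (List Char)) :
    safety_filter_loop u kws = false ↔ ∃ w ∈ kws, w <:+: PySem.Chars.lower u.toList := by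
  induction kws with
  | nil => simp [safety_filter_loop]
  | cons w ws ih =>
      simp only [safety_filter_loop]
      split_ifs with hin
      · exact iff_of_true rfl ⟨w, List.mem_cons_self, (PySem.Chars.isIn_iff_infix w _).mp hin⟩
      · rw [ih]
        constructor
        · rintro ⟨v, hv, hinf⟩; exact ⟨v, List.mem_cons_of_mem w hv, hinf⟩
        · rintro ⟨v, hv, hinf⟩
          rcases List.mem_cons.mp hv with rfl | hv'
          · have := (PySem.Chars.isIn_iff_infix v (PySem.Chars.lower u.toList)).mpr hinf
            simp [this] at hin
          · exact ⟨v, hv', hinf⟩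

-- ===== VERDICT (by name: the statement is the Claim_ definition above) =====
theorem safety_filter_spec : Claim_equal_safety_filter := by
  intro u _
  unfold Spec_safety_filter safety_filter safety_filter_alt
  have hk : pvKeywordsA = pvKeywordsB := rfl
  have h : safety_filter_loop u pvKeywordsA = false ↔
      safety_filter_scan pvKeywordsB (PySem.Chars.lower u.toList) = false := by
    rw [hk, loop_eq_false_iff, scan_eq_false_iff]
  cases hA : safety_filter_loop u pvKeywordsA <;>
    cases hB : safety_filter_scan pvKeywordsB (PySem.Chars.lower u.toList) <;> simp_all
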